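-- pv_equiv track=rewrite | github.com/Maknistong68/Vehicle-Verification | scripts/generate_migration.py | classify_equipment
-- ===== SOURCE A (Python) =====
-- def classify_equipment(name):
--     vehicles = ['Light Vehicle', 'Bus', 'Mini-Bus', 'Coach', 'Coaster', 'Ambulance',
--                 'Dyna', 'Mini Truck', 'Tanker', 'Sewage', 'Service Truck',
--                 'Flatbed Trailer', 'Concrete Mixer', 'Dump Truck', 'HIAB',
--                 'Concrete Pump']
--     for v in vehicles:
--         if v.lower() in str(name).lower():
--             return 'vehicle'
--     return 'heavy_equipment'
-- ===== SOURCE B (Python) =====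
-- VEHICLES = ['Light Vehicle', 'Bus', 'Mini-Bus', 'Coach', 'Coaster', 'Ambulance',
--             'Dyna', 'Mini Truck', 'Tanker', 'Sewage', 'Service Truck',
--             'Flatbed Trailer', 'Concrete Mixer', 'Dump Truck', 'HIAB',
--             'Concrete Pump']
--
-- # Index the lowered keywords by their first character, built once at module load.
-- _BY_FIRST = {}
-- for _v in VEHICLES:
--     _p = _v.lower()
--     _BY_FIRST[_p[0]] = _BY_FIRST.get(_p[0], []) + [_p]
--
--
-- def classify_equipment(name):
--     # One left-to-right pass over the lowered name: at each position, only the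
--     # keywords whose first character matches are probed with startswith.
--     s = str(name).lower()
--     for i in range(len(s)):
--         for p in _BY_FIRST.get(s[i], ()):
--             if s.startswith(p, i):
--                 return 'vehicle'
--     return 'heavy_equipment'
-- ===== Notes on version B (the rewrite author's own statement) =====
-- stated objective: alternative
-- what changed: Instead of scanning the whole name once per keyword (16 separate substring scans), B builds a dict indexing the lowered keywords by their first character once at module load and makes a single left-to-right pass over the lowered name, probing only the first-character bucket with startswith at each position.
import Mathlib
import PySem

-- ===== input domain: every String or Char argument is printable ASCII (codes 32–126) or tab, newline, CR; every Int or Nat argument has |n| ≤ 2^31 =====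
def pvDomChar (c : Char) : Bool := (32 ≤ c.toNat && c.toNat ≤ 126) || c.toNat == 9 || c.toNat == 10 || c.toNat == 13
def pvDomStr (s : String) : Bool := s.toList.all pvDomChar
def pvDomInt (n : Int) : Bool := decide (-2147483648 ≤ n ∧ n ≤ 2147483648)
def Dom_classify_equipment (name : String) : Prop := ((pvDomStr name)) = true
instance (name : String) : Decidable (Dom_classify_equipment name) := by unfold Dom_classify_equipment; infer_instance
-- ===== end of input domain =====

-- B inverts A's loops (alternative): instead of one full substring scan of the name per
-- keyword, it indexes the lowered keywords by first character once and makes a single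
-- left-to-right pass over the lowered name; return values are proved identical.

-- ===== PORT A =====
-- A's for-loop with early return, as structural recursion over the vehicles list.
def pvLoopA : List String → String → String
  | [], _ => "heavy_equipment"
  | v :: rest, name =>
    if PySem.Str.isIn (PySem.Str.lower v) (PySem.Str.lower name) then "vehicle"
    else pvLoopA rest name

def classify_equipment (name : String) : String :=
  let vehicles := ["Light Vehicle", "Bus", "Mini-Bus", "Coach", "Coaster", "Ambulance",
                   "Dyna", "Mini Truck", "Tanker", "Sewage", "Service Truck",
                   "Flatbed Trailer", "Concrete Mixer", "Dump Truck", "HIAB",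
                   "Concrete Pump"]
  pvLoopA vehicles name

-- ===== PORT B =====
def pvVehiclesB : List String :=
  ["Light Vehicle", "Bus", "Mini-Bus", "Coach", "Coaster", "Ambulance",
   "Dyna", "Mini Truck", "Tanker", "Sewage", "Service Truck",
   "Flatbed Trailer", "Concrete Mixer", "Dump Truck", "HIAB",
   "Concrete Pump"]

-- the lowered keywords, as Source B computes them at module load
def pvLowPatterns : List (List Char) :=
  pvVehiclesB.map (fun v => (PySem.Str.lower v).toList)

-- Source B's module-level dict build: _BY_FIRST[_p[0]] = _BY_FIRST.get(_p[0], []) + [_p]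
-- (_p[0] on the known-nonempty lowered keywords is headD ' ')
def pvByFirst : PySem.Dict Char (List (List Char)) :=
  pvLowPatterns.foldl (fun d p => d.modify (p.headD ' ') [] (· ++ [p])) PySem.Dict.empty

-- Source B's scan: 'for i in range(len(s))' over the lowered name, as structural recursion
-- on the remaining suffix; s.startswith(p, i) is isPrefixOf on that suffix (exact: both
-- test that p occurs at position i), and _BY_FIRST.get(s[i], ()) is getD.
def pvScanB (d : PySem.Dict Char (List (List Char))) : List Char → String
  | [] => "heavy_equipment"
  | c :: rest =>
    if (d.getD c []).any (fun p => p.isPrefixOf (c :: rest)) then "vehicle"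
    else pvScanB d rest

def classify_equipment_alt (name : String) : String :=
  pvScanB pvByFirst (PySem.Str.lower name).toList

-- ===== PRECONDITION & SPEC =====
def Spec_classify_equipment (name : String) (out : String) : Prop := out = classify_equipment_alt name
instance (name : String) (out : String) : Decidable (Spec_classify_equipment name out) := by unfold Spec_classify_equipment; infer_instance

-- ===== CLAIM (what is proved, stated in full; the proofs are below) =====
def Claim_equal_classify_equipment : Prop := ∀ (name : String), Dom_classify_equipment name → Spec_classify_equipment name (classify_equipment name)

-- ===== LEMMAS AND PROOFS =====
theorem pvLoopA_eq_any (l : List String) (name : String) :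
    pvLoopA l name =
      if l.any (fun v => PySem.Str.isIn (PySem.Str.lower v) (PySem.Str.lower name)) then "vehicle"
      else "heavy_equipment" := by
  induction l with
  | nil => rfl
  | cons v rest ih =>
    cases h : PySem.Str.isIn (PySem.Str.lower v) (PySem.Str.lower name) <;>
      simp [pvLoopA, PySem.Str.isIn, ih] <;>
      simp [PySem.Str.isIn] at h <;> simp [h]

theorem pvLowPatterns_ne_nil : ∀ p ∈ pvLowPatterns, p ≠ [] := by decide

-- the dict bucket for c holds exactly the keywords whose first character is c
theorem pvBucket_iff (c : Char) (p : List Char) :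
    p ∈ pvByFirst.getD c [] ↔ p ∈ pvLowPatterns ∧ p.headD ' ' = c := by
  have h : pvByFirst =
      (pvLowPatterns.map (fun p => (p.headD ' ', p))).foldl
        (fun d q => d.modify q.1 [] (· ++ [q.2])) PySem.Dict.empty := by
    rw [List.foldl_map]; rfl
  rw [h, PySem.Dict.getD_foldl_modify_append, PySem.Dict.getD_empty]
  simp only [List.mem_map, List.mem_filter, List.nil_append]
  constructor
  · rintro ⟨q, ⟨⟨a, ha, rfl⟩, hc⟩, rfl⟩
    exact ⟨ha, by simpa using hc⟩
  · rintro ⟨hp, hc⟩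
    exact ⟨(p.headD ' ', p), ⟨⟨p, hp, rfl⟩, by simpa using hc⟩, rfl⟩

-- checking only the first-character bucket at the head position loses nothing
theorem pvBucket_any_iff (c : Char) (rest : List Char) :
    ((pvByFirst.getD c []).any (fun p => p.isPrefixOf (c :: rest)) = true)
      ↔ ∃ p ∈ pvLowPatterns, p <+: c :: rest := by
  simp only [List.any_eq_true, List.isPrefixOf_iff_prefix]
  constructor
  · rintro ⟨p, hp, hpre⟩
    exact ⟨p, ((pvBucket_iff c p).mp hp).1, hpre⟩
  · rintro ⟨p, hp, hpre⟩
    refine ⟨p, (pvBucket_iff c p).mpr ⟨hp, ?_⟩, hpre⟩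
    obtain ⟨a, t, rfl⟩ := List.exists_cons_of_ne_nil (pvLowPatterns_ne_nil p hp)
    obtain ⟨h1, -⟩ := List.cons_prefix_cons.mp hpre
    simp [h1]

theorem pvScanB_eq (s : List Char) :
    pvScanB pvByFirst s =
      if ∃ p ∈ pvLowPatterns, p <:+: s then "vehicle" else "heavy_equipment" := by
  induction s with
  | nil =>
    simp only [pvScanB, List.infix_nil]
    rw [if_neg]
    rintro ⟨p, hp, rfl⟩
    exact pvLowPatterns_ne_nil [] hp rfl
  | cons c rest ih =>
    simp only [pvScanB, ih]
    by_cases hb : ((pvByFirst.getD c []).any (fun p => p.isPrefixOf (c :: rest)) = true)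
    · rw [if_pos hb, if_pos]
      obtain ⟨p, hp, hpre⟩ := (pvBucket_any_iff c rest).mp hb
      exact ⟨p, hp, hpre.isInfix⟩
    · rw [if_neg hb]
      by_cases hr : ∃ p ∈ pvLowPatterns, p <:+: rest
      · rw [if_pos hr, if_pos]
        obtain ⟨p, hp, hin⟩ := hr
        exact ⟨p, hp, (List.infix_cons_iff).mpr (Or.inr hin)⟩
      · rw [if_neg hr, if_neg]
        rintro ⟨p, hp, hin⟩
        rcases (List.infix_cons_iff).mp hin with h | h
        · exact hb ((pvBucket_any_iff c rest).mpr ⟨p, hp, h⟩)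
        · exact hr ⟨p, hp, h⟩

-- ===== VERDICT (by name: the statement is the Claim_ definition above) =====
theorem classify_equipment_spec : Claim_equal_classify_equipment := by
  intro name _
  unfold Spec_classify_equipment classify_equipment classify_equipment_alt
  rw [pvLoopA_eq_any, pvScanB_eq]
  have : (["Light Vehicle", "Bus", "Mini-Bus", "Coach", "Coaster", "Ambulance",
           "Dyna", "Mini Truck", "Tanker", "Sewage", "Service Truck",
           "Flatbed Trailer", "Concrete Mixer", "Dump Truck", "HIAB",
           "Concrete Pump"].any
            (fun v => PySem.Str.isIn (PySem.Str.lower v) (PySem.Str.lower name)) = true)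
      ↔ ∃ p ∈ pvLowPatterns, p <:+: (PySem.Str.lower name).toList := by
    simp only [pvLowPatterns, pvVehiclesB, List.any_eq_true, List.mem_map,
      PySem.Str.isIn_iff_infix]
    constructor
    · rintro ⟨v, hv, hin⟩
      exact ⟨(PySem.Str.lower v).toList, ⟨v, hv, rfl⟩, hin⟩
    · rintro ⟨p, ⟨v, hv, rfl⟩, hin⟩
      exact ⟨v, hv, hin⟩
  by_cases h : ∃ p ∈ pvLowPatterns, p <:+: (PySem.Str.lower name).toList
  · rw [if_pos (this.mpr h), if_pos h]
  · rw [if_neg (fun hb => h (this.mp hb)), if_neg h]
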